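-- pv_equiv track=rewrite | github.com/TimaDub/Programs | _process.py | forge_version_sort
-- ===== SOURCE A (Python) =====
-- def forge_version_sort(versions):
--     def version_key(version):
--         main_version, _, _ = version.partition('-')
--         parts = main_version.split('.')
--         numeric_parts = [int(part) for part in parts if part.isdigit()]
--         return tuple(numeric_parts)
--
--     sorted_versions = sorted(versions, key=version_key, reverse=True)
--     filtered_versions = []
--     seen_main_versions = set()
--     main_versions_only = []
--     all_versions_sorted = []
--
--     for version in sorted_versions:
--         main_version, _, _ = version.partition('-')
--         parts = main_version.split('.')
--         numeric_parts = tuple(int(part) for part in parts if part.isdigit())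
--         if numeric_parts not in seen_main_versions:
--             seen_main_versions.add(numeric_parts)
--             filtered_versions.append(version)
--             main_versions_only.append(main_version)
--         all_versions_sorted.append(version)
--
--     return filtered_versions, main_versions_only, sorted(all_versions_sorted, key=version_key, reverse=True)
-- ===== SOURCE B (Python) =====
-- def forge_version_sort(versions):
--     def version_key(version):
--         main_version, _, _ = version.partition('-')
--         return tuple(int(p) for p in main_version.split('.') if p.isdigit())
--
--     # dedup BEFORE sorting: remember the first version carrying each key
--     # (the stable descending sort would keep exactly that one), then sort
--     # only the distinct keys.
--     first_by_key = {}
--     for version in versions: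
--         first_by_key.setdefault(version_key(version), version)
--     filtered_versions = [first_by_key[k] for k in sorted(first_by_key, reverse=True)]
--     main_versions_only = [v.partition('-')[0] for v in filtered_versions]
--     all_versions_sorted = sorted(versions, key=version_key, reverse=True)
--     return filtered_versions, main_versions_only, all_versions_sorted
-- ===== Notes on version B (the rewrite author's own statement) =====
-- stated objective: alternative
-- what changed: B dedups before sorting: a single dict pass over the original list records the first version per numeric key (what the stable sort would keep), then only the distinct keys are sorted descending to build the filtered lists, instead of A's sort-everything-then-seen-set-scan; the full sort is done once for the third output.
import Mathlib
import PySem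

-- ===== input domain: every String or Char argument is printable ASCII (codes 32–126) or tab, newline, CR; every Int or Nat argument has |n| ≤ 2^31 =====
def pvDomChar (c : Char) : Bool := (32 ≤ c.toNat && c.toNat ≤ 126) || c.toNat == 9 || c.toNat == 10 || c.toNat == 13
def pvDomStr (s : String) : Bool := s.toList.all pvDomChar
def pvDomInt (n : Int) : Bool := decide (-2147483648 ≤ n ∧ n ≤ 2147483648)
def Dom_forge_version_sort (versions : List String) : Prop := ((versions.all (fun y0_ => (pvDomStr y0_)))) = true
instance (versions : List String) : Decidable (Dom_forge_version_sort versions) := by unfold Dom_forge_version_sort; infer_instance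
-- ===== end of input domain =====

-- B dedups BEFORE sorting: one dict pass over the original list records the first version per
-- numeric key (exactly what A's stable descending sort would keep), then only the distinct keys
-- are sorted; A sorts everything first and scans with a seen-set. Objective: alternative.

-- ===== PORT A =====
-- helper for v.partition('-')[0]: hand-ported (no PySem partition), exact — everything before the
-- first '-', or the whole string when '-' is absent.
def pvMainChars : List Char → List Char
  | [] => []
  | c :: t => if c = '-' then [] else c :: pvMainChars t

def pvMainPart (v : String) : String := String.ofList (pvMainChars v.toList)

-- version_key (the identical nested helper both Pythons define); split('.') has a nonempty
-- separator so Str.split? never returns none, and int(p) with p.isdigit() never fails.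
def pvVersionKey (v : String) : List Int :=
  let parts := (PySem.Str.split? (pvMainPart v) ".").getD []
  (parts.filter (fun p => PySem.Str.strIsdigit p)).map (fun p => (PySem.Int.ofStr? p).getD 0)

def forge_version_sort (versions : List String) : List String × List String × List String :=
  let sorted_versions := PySem.List.sorted versions pvVersionKey true
  let st := sorted_versions.foldl
    (fun (st : List String × PySem.Set (List Int) × List String × List String) version =>
      let main_version := pvMainPart version
      let parts := (PySem.Str.split? main_version ".").getD []
      let numeric_parts := (parts.filter (fun p => PySem.Str.strIsdigit p)).map
        (fun p => (PySem.Int.ofStr? p).getD 0)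
      let st := if st.2.1.contains numeric_parts then st
        else (st.1 ++ [version], PySem.Set.add st.2.1 numeric_parts,
              st.2.2.1 ++ [main_version], st.2.2.2)
      (st.1, st.2.1, st.2.2.1, st.2.2.2 ++ [version]))
    (([], PySem.Set.empty, [], []) :
      List String × PySem.Set (List Int) × List String × List String)
  (st.1, st.2.2.1, PySem.List.sorted st.2.2.2 pvVersionKey true)

-- ===== PORT B =====
def forge_version_sort_alt (versions : List String) : List String × List String × List String :=
  let first_by_key := versions.foldl
    (fun (d : PySem.Dict (List Int) String) version =>
      d.setdefault (pvVersionKey version) version)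
    PySem.Dict.empty
  -- first_by_key[k] for k drawn from the dict's own keys always succeeds; getD "" is exact here
  let filtered_versions := (PySem.List.sorted first_by_key.keys (fun k => k) true).map
    (fun k => (first_by_key.get? k).getD "")
  let main_versions_only := filtered_versions.map (fun v => pvMainPart v)
  let all_versions_sorted := PySem.List.sorted versions pvVersionKey true
  (filtered_versions, main_versions_only, all_versions_sorted)

-- ===== PRECONDITION & SPEC =====
def Spec_forge_version_sort (versions : List String) (out : List String × List String × List String) : Prop := out = forge_version_sort_alt versions
instance (versions : List String) (out : List String × List String × List String) : Decidable (Spec_forge_version_sort versions out) := by unfold Spec_forge_version_sort; infer_instance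

-- ===== CLAIM (what is proved, stated in full; the proofs are below) =====
def Claim_equal_forge_version_sort : Prop := ∀ (versions : List String), Dom_forge_version_sort versions → Spec_forge_version_sort versions (forge_version_sort versions)

-- ===== LEMMAS AND PROOFS =====

-- A's loop body as a named step function (definitionally the port's lambda).
def pvStepA (st : List String × PySem.Set (List Int) × List String × List String)
    (version : String) : List String × PySem.Set (List Int) × List String × List String :=
  let main_version := pvMainPart version
  let parts := (PySem.Str.split? main_version ".").getD []
  let numeric_parts := (parts.filter (fun p => PySem.Str.strIsdigit p)).map
    (fun p => (PySem.Int.ofStr? p).getD 0)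
  let st := if st.2.1.contains numeric_parts then st
    else (st.1 ++ [version], PySem.Set.add st.2.1 numeric_parts,
          st.2.2.1 ++ [main_version], st.2.2.2)
  (st.1, st.2.1, st.2.2.1, st.2.2.2 ++ [version])

-- B's dict-building step.
def pvStepB (d : PySem.Dict (List Int) String) (version : String) : PySem.Dict (List Int) String :=
  d.setdefault (pvVersionKey version) version

-- keep-first-per-key, the reference dedup both sides are reduced to
def pvDkeep (seen : List (List Int)) : List String → List String
  | [] => []
  | v :: t => if pvVersionKey v ∈ seen then pvDkeep seen t
              else v :: pvDkeep (pvVersionKey v :: seen) t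

def pvIns (x : String) (acc : List String) : List String :=
  PySem.List.insertBy (fun a b => decide (pvVersionKey b < pvVersionKey a)) x acc

theorem pvIns_nil (x : String) : pvIns x [] = [x] := rfl

theorem pvIns_cons (x y : String) (t : List String) :
    pvIns x (y :: t) = if decide (pvVersionKey y < pvVersionKey x) = true
      then x :: y :: t else y :: pvIns x t := rfl

theorem pvPortA_eq (versions : List String) : forge_version_sort versions =
    (let l := PySem.List.sorted versions pvVersionKey true
     let st := l.foldl pvStepA ([], PySem.Set.empty, [], [])
     (st.1, st.2.2.1, PySem.List.sorted st.2.2.2 pvVersionKey true)) := rfl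

theorem pvPortB_eq (versions : List String) : forge_version_sort_alt versions =
    (let d := versions.foldl pvStepB PySem.Dict.empty
     let f := (PySem.List.sorted d.keys (fun k => k) true).map (fun k => (d.get? k).getD "")
     (f, f.map (fun v => pvMainPart v), PySem.List.sorted versions pvVersionKey true)) := rfl

theorem pvStepA_eq (st : List String × PySem.Set (List Int) × List String × List String)
    (v : String) : pvStepA st v =
    (if st.2.1.contains (pvVersionKey v) = true then (st.1, st.2.1, st.2.2.1, st.2.2.2 ++ [v])
     else (st.1 ++ [v], PySem.Set.add st.2.1 (pvVersionKey v),
           st.2.2.1 ++ [pvMainPart v], st.2.2.2 ++ [v])) := by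
  cases hc : st.2.1.contains (pvVersionKey v) <;>
  · conv_lhs => rw [pvStepA]
    rw [show ((((PySem.Str.split? (pvMainPart v) ".").getD []).filter
        (fun p => PySem.Str.strIsdigit p)).map (fun p => (PySem.Int.ofStr? p).getD 0))
      = pvVersionKey v from rfl, hc]
    rfl

theorem pvFoldA_fourth (l : List String) (f : List String) (s : PySem.Set (List Int))
    (m a : List String) : (l.foldl pvStepA (f, s, m, a)).2.2.2 = a ++ l := by
  induction l generalizing f s m a with
  | nil => simp
  | cons v t ih =>
    rw [List.foldl_cons, pvStepA_eq]
    split <;> simp [ih]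

theorem pvDkeep_congr (t : List String) (s s' : List (List Int))
    (h : ∀ k, k ∈ s ↔ k ∈ s') : pvDkeep s t = pvDkeep s' t := by
  induction t generalizing s s' with
  | nil => rfl
  | cons v t ih =>
    by_cases hv : pvVersionKey v ∈ s
    · rw [pvDkeep, pvDkeep, if_pos hv, if_pos ((h _).mp hv)]
      exact ih s s' h
    · rw [pvDkeep, pvDkeep, if_neg hv, if_neg (fun hx => hv ((h _).mpr hx))]
      refine congrArg _ (ih _ _ ?_)
      intro k; simp [h k]

-- A's fold produces exactly keep-first-per-key (plus the accumulated fourth list)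
theorem pvFoldA_keep (t : List String) (f : List String) (s : PySem.Set (List Int))
    (m a : List String) :
    (t.foldl pvStepA (f, s, m, a)).1 = f ++ pvDkeep s t ∧
    (t.foldl pvStepA (f, s, m, a)).2.2.1 = m ++ (pvDkeep s t).map pvMainPart := by
  induction t generalizing f s m a with
  | nil => simp [pvDkeep]
  | cons v t ih =>
    rw [List.foldl_cons, pvStepA_eq]
    by_cases hc : s.contains (pvVersionKey v) = true
    · have hv : pvVersionKey v ∈ s := by
        simpa [PySem.Set.contains, List.contains_eq_mem] using hc
      rw [if_pos hc, pvDkeep, if_pos hv]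
      exact ih f s m (a ++ [v])
    · have hv : pvVersionKey v ∉ s := by
        simpa [PySem.Set.contains, List.contains_eq_mem] using hc
      rw [if_neg hc]
      have hadd : PySem.Set.add s (pvVersionKey v) = s ++ [pvVersionKey v] := by
        simp [PySem.Set.add, PySem.Set.contains, List.contains_eq_mem, hv]
      have hcg : pvDkeep (s ++ [pvVersionKey v]) t = pvDkeep (pvVersionKey v :: s) t :=
        pvDkeep_congr t _ _ (by intro k; simp; tauto)
      constructor
      · show (List.foldl pvStepA
            (f ++ [v], PySem.Set.add s (pvVersionKey v), m ++ [pvMainPart v], a ++ [v]) t).1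
            = f ++ pvDkeep s (v :: t)
        rw [hadd,
          (ih (f ++ [v]) (s ++ [pvVersionKey v]) (m ++ [pvMainPart v]) (a ++ [v])).1,
          hcg, pvDkeep, if_neg hv]
        simp
      · show (List.foldl pvStepA
            (f ++ [v], PySem.Set.add s (pvVersionKey v), m ++ [pvMainPart v], a ++ [v]) t).2.2.1
            = m ++ (pvDkeep s (v :: t)).map pvMainPart
        rw [hadd,
          (ih (f ++ [v]) (s ++ [pvVersionKey v]) (m ++ [pvMainPart v]) (a ++ [v])).2,
          hcg, pvDkeep, if_neg hv]
        simp

-- members of pvDkeep: in the list, key unseen, and first in the list with that key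
theorem pvDkeep_spec (t : List String) (s : List (List Int)) (v : String)
    (hv : v ∈ pvDkeep s t) :
    v ∈ t ∧ pvVersionKey v ∉ s ∧
    (t.filter (fun w => pvVersionKey w == pvVersionKey v)).head? = some v := by
  induction t generalizing s with
  | nil => simp [pvDkeep] at hv
  | cons u t ih =>
    rw [pvDkeep] at hv
    by_cases hu : pvVersionKey u ∈ s
    · rw [if_pos hu] at hv
      obtain ⟨h1, h2, h3⟩ := ih s hv
      have hne : (pvVersionKey u == pvVersionKey v) = false := by
        rw [beq_eq_false_iff_ne]
        intro he; exact h2 (he ▸ hu)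
      refine ⟨List.mem_cons_of_mem _ h1, h2, ?_⟩
      rw [List.filter_cons, hne, if_neg Bool.false_ne_true]
      exact h3
    · rw [if_neg hu] at hv
      rcases List.mem_cons.mp hv with rfl | hv'
      · refine ⟨(by simp : v ∈ v :: t), hu, ?_⟩
        rw [List.filter_cons, beq_self_eq_true, if_pos rfl]
        rfl
      · obtain ⟨h1, h2, h3⟩ := ih _ hv'
        have h2' : pvVersionKey v ∉ s := fun hx => h2 (List.mem_cons_of_mem _ hx)
        have hne : (pvVersionKey u == pvVersionKey v) = false := by
          rw [beq_eq_false_iff_ne]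
          intro he; exact h2 (List.mem_cons.mpr (Or.inl he.symm))
        refine ⟨List.mem_cons_of_mem _ h1, h2', ?_⟩
        rw [List.filter_cons, hne, if_neg Bool.false_ne_true]
        exact h3

-- every key occurring in the list and not yet seen is represented in pvDkeep
theorem pvDkeep_mem_keys (t : List String) (s : List (List Int)) (k : List Int)
    (hk : k ∈ t.map pvVersionKey) (hs : k ∉ s) : k ∈ (pvDkeep s t).map pvVersionKey := by
  induction t generalizing s with
  | nil => simp at hk
  | cons v t ih =>
    rw [pvDkeep]
    rcases List.mem_map.mp hk with ⟨w, hw, rfl⟩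
    by_cases hv : pvVersionKey v ∈ s
    · rw [if_pos hv]
      rcases List.mem_cons.mp hw with rfl | hw'
      · exact absurd hv hs
      · exact ih s (List.mem_map_of_mem hw') hs
    · rw [if_neg hv]
      by_cases hkv : pvVersionKey w = pvVersionKey v
      · simp [hkv]
      · rcases List.mem_cons.mp hw with rfl | hw'
        · exact absurd rfl hkv
        · have : pvVersionKey w ∈ (pvDkeep (pvVersionKey v :: s) t).map pvVersionKey :=
            ih _ (List.mem_map_of_mem hw') (by simp [hkv, hs])
          simp [this]

-- on a key-descending list the kept keys are strictly decreasing
theorem pvDkeep_keys_pairwise (t : List String)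
    (hp : t.Pairwise (fun a b => pvVersionKey b ≤ pvVersionKey a)) (s : List (List Int)) :
    ((pvDkeep s t).map pvVersionKey).Pairwise (fun a b => b < a) := by
  induction t generalizing s with
  | nil => simp [pvDkeep]
  | cons v t ih =>
    have hhd := (List.pairwise_cons.mp hp).1
    have htl := (List.pairwise_cons.mp hp).2
    rw [pvDkeep]
    by_cases hv : pvVersionKey v ∈ s
    · rw [if_pos hv]; exact ih htl s
    · rw [if_neg hv, List.map_cons, List.pairwise_cons]
      refine ⟨?_, ih htl _⟩
      intro k hk
      rcases List.mem_map.mp hk with ⟨w, hw, rfl⟩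
      obtain ⟨hwt, hwn, -⟩ := pvDkeep_spec t _ w hw
      exact lt_of_le_of_ne (hhd w hwt) (fun he => hwn (by simp [he]))

-- the default DecidableLT (List Int) instance the ports elaborate with is propositionally the
-- one Mathlib's LinearOrder provides (Decidable is a subsingleton), so the sorted calls agree
theorem pvSortedEq (vs : List String) :
    PySem.List.sorted vs pvVersionKey true
    = @PySem.List.sorted String (List Int) List.instLinearOrder.toLT
        LinearOrder.toDecidableLT vs pvVersionKey true := by
  have h : (fun (a b : List Int) => List.decidableLT a b)
      = (LinearOrder.toDecidableLT (α := List Int)) := by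
    funext a b; exact Subsingleton.elim _ _
  exact congrArg
    (fun i => @PySem.List.sorted String (List Int) List.instLT i vs pvVersionKey true) h

theorem pvSortedEqK (ks : List (List Int)) :
    PySem.List.sorted ks (fun k => k) true
    = @PySem.List.sorted (List Int) (List Int) List.instLinearOrder.toLT
        LinearOrder.toDecidableLT ks (fun k => k) true := by
  have h : (fun (a b : List Int) => List.decidableLT a b)
      = (LinearOrder.toDecidableLT (α := List Int)) := by
    funext a b; exact Subsingleton.elim _ _
  exact congrArg
    (fun i => @PySem.List.sorted (List Int) (List Int) List.instLT i ks (fun k => k) true) h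

-- inserting x never disturbs the filter w.r.t. a key other than x's
theorem pvInsFilterNe (x : String) (k : List Int) (hk : (pvVersionKey x == k) = false)
    (acc : List String) :
    (pvIns x acc).filter (fun y => pvVersionKey y == k)
      = acc.filter (fun y => pvVersionKey y == k) := by
  induction acc with
  | nil => rw [pvIns_nil, List.filter_cons, hk, if_neg Bool.false_ne_true]
  | cons y t ih =>
    rw [pvIns_cons]
    split
    · rw [List.filter_cons, hk, if_neg Bool.false_ne_true]
    · rw [List.filter_cons, List.filter_cons (xs := t)]
      rcases Bool.eq_false_or_eq_true (pvVersionKey y == k) with h1 | h1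
      · rw [h1, if_pos rfl, if_pos rfl, ih]
      · rw [h1, if_neg Bool.false_ne_true, if_neg Bool.false_ne_true, ih]

-- into a key-descending list, x is inserted after every element sharing its key
theorem pvInsFilterEq (x : String) (acc : List String)
    (hp : acc.Pairwise (fun a b => pvVersionKey b ≤ pvVersionKey a)) :
    (pvIns x acc).filter (fun y => pvVersionKey y == pvVersionKey x)
      = acc.filter (fun y => pvVersionKey y == pvVersionKey x) ++ [x] := by
  induction acc with
  | nil => rw [pvIns_nil, List.filter_cons, beq_self_eq_true, if_pos rfl]; rfl
  | cons y t ih =>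
    have hhd := (List.pairwise_cons.mp hp).1
    have htl := (List.pairwise_cons.mp hp).2
    rw [pvIns_cons]
    split
    · next hlt =>
      have hxy : pvVersionKey y < pvVersionKey x := of_decide_eq_true hlt
      have hnil : List.filter (fun z => pvVersionKey z == pvVersionKey x) (y :: t) = [] := by
        rw [List.filter_eq_nil_iff]
        intro z hz hb
        have hzx : pvVersionKey z = pvVersionKey x := eq_of_beq hb
        have hzy : pvVersionKey z ≤ pvVersionKey y := by
          rcases List.mem_cons.mp hz with rfl | hz'
          · exact le_refl _
          · exact hhd z hz'
        exact absurd hzy (not_le.mpr (by rw [hzx]; exact hxy))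
      rw [List.filter_cons, beq_self_eq_true, if_pos rfl, hnil]
      rfl
    · rw [List.filter_cons, List.filter_cons (xs := t)]
      rcases Bool.eq_false_or_eq_true (pvVersionKey y == pvVersionKey x) with h1 | h1
      · rw [h1, if_pos rfl, if_pos rfl, ih htl]
        rfl
      · rw [h1, if_neg Bool.false_ne_true, if_neg Bool.false_ne_true, ih htl]

-- STABILITY of the descending sort: elements of equal key keep their original order
theorem pvSortedFilter (xs : List String) (k : List Int) :
    (PySem.List.sorted xs pvVersionKey true).filter (fun v => pvVersionKey v == k)
      = xs.filter (fun v => pvVersionKey v == k) := by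
  induction xs using List.reverseRecOn with
  | nil =>
    have h0 : PySem.List.sorted ([] : List String) pvVersionKey true = [] := by
      rw [PySem.List.sorted_rev_eq_foldl_insertBy]; rfl
    rw [h0]
  | append_singleton ys x ih =>
    have hstep : PySem.List.sorted (ys ++ [x]) pvVersionKey true
        = pvIns x (PySem.List.sorted ys pvVersionKey true) := by
      rw [PySem.List.sorted_rev_eq_foldl_insertBy, List.foldl_append,
        ← PySem.List.sorted_rev_eq_foldl_insertBy]
      rfl
    have hpw : (PySem.List.sorted ys pvVersionKey true).Pairwise
        (fun a b => pvVersionKey b ≤ pvVersionKey a) := by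
      rw [pvSortedEq]; exact PySem.List.sorted_pairwise_rev ys pvVersionKey
    rw [hstep, List.filter_append]
    rcases Bool.eq_false_or_eq_true (pvVersionKey x == k) with h | h
    · have hk : k = pvVersionKey x := (eq_of_beq h).symm
      subst hk
      rw [pvInsFilterEq x _ hpw, ih, List.filter_cons, h, if_pos rfl]
      rfl
    · rw [pvInsFilterNe x k h, ih, List.filter_cons, h, if_neg Bool.false_ne_true]
      simp

-- B's dict lookup is the first element of the original list carrying the key
theorem pvDictGet (l : List String) (d : PySem.Dict (List Int) String) (k : List Int) :
    (l.foldl pvStepB d).get? k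
      = (d.get? k).or ((l.filter (fun v => pvVersionKey v == k)).head?) := by
  induction l generalizing d with
  | nil => simp
  | cons v t ih =>
    rw [List.foldl_cons]
    by_cases hc : d.contains (pvVersionKey v) = true
    · rw [show pvStepB d v = d from PySem.Dict.setdefault_of_contains d v hc, ih d,
        List.filter_cons]
      rcases Bool.eq_false_or_eq_true (pvVersionKey v == k) with h | h
      · have hk : k = pvVersionKey v := (eq_of_beq h).symm
        have hsome : (d.get? k).isSome := by
          rw [← PySem.Dict.contains_eq_isSome_get?, hk]; exact hc
        obtain ⟨w, hw⟩ := Option.isSome_iff_exists.mp hsome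
        rw [h, if_pos rfl, hw]
        rfl
      · rw [h, if_neg Bool.false_ne_true]
    · have hc' : d.contains (pvVersionKey v) = false := by simpa using hc
      rw [show pvStepB d v = d.insert (pvVersionKey v) v from
        PySem.Dict.setdefault_of_not_contains d v hc', ih, List.filter_cons]
      rcases Bool.eq_false_or_eq_true (pvVersionKey v == k) with h | h
      · have hk : k = pvVersionKey v := (eq_of_beq h).symm
        have hnone : d.get? k = none := by
          rw [← Option.not_isSome_iff_eq_none, ← PySem.Dict.contains_eq_isSome_get?, hk]
          simp [hc']
        rw [PySem.Dict.get?_insert, if_pos hk, hnone, h, if_pos rfl]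
        rfl
      · have hne : k ≠ pvVersionKey v := fun he => by
          rw [he, beq_self_eq_true] at h; cases h
        rw [PySem.Dict.get?_insert, if_neg hne, h, if_neg Bool.false_ne_true]

theorem pvDictKeysNodup (l : List String) (d : PySem.Dict (List Int) String)
    (h : d.keys.Nodup) : (l.foldl pvStepB d).keys.Nodup := by
  induction l generalizing d with
  | nil => exact h
  | cons v t ih =>
    rw [List.foldl_cons]
    refine ih _ ?_
    rw [pvStepB, PySem.Dict.keys_setdefault]
    split
    · exact h
    · next hc =>
      have hm : pvVersionKey v ∉ d.keys := by
        rw [PySem.Dict.contains_eq_decide_mem_keys] at hc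
        simpa using hc
      exact h.append (List.nodup_singleton _)
        (by intro a ha hb; rw [List.mem_singleton] at hb; exact hm (hb ▸ ha))

theorem pvDictKeysMem (l : List String) (d : PySem.Dict (List Int) String) (k : List Int) :
    k ∈ (l.foldl pvStepB d).keys ↔ k ∈ d.keys ∨ k ∈ l.map pvVersionKey := by
  induction l generalizing d with
  | nil => simp
  | cons v t ih =>
    rw [List.foldl_cons, ih, pvStepB, PySem.Dict.keys_setdefault]
    split
    · next hc =>
      have hm : pvVersionKey v ∈ d.keys := by
        rw [PySem.Dict.contains_eq_decide_mem_keys] at hc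
        simpa using hc
      simp only [List.map_cons, List.mem_cons]
      constructor
      · rintro (h | h)
        · exact Or.inl h
        · exact Or.inr (Or.inr h)
      · rintro (h | h | h)
        · exact Or.inl h
        · exact Or.inl (by rw [h]; exact hm)
        · exact Or.inr h
    · constructor <;>
        (intro h;
         simp only [List.map_cons, List.mem_cons, List.mem_append] at h ⊢;
         tauto)

-- ===== VERDICT (by name: the statement is the Claim_ definition above) =====
set_option maxHeartbeats 1000000 in
theorem forge_version_sort_spec : Claim_equal_forge_version_sort := by
  intro versions _
  unfold Spec_forge_version_sort
  rw [pvPortA_eq, pvPortB_eq]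
  set L := PySem.List.sorted versions pvVersionKey true with hL
  set d := versions.foldl pvStepB PySem.Dict.empty with hd
  have hLpw : L.Pairwise (fun a b => pvVersionKey b ≤ pvVersionKey a) := by
    rw [hL, pvSortedEq]; exact PySem.List.sorted_pairwise_rev versions pvVersionKey
  obtain ⟨hA1, hA2⟩ := pvFoldA_keep L [] PySem.Set.empty [] []
  have hA4 := pvFoldA_fourth L [] PySem.Set.empty [] []
  have hempty : pvDkeep (PySem.Set.empty : PySem.Set (List Int)) L = pvDkeep [] L := rfl
  have hnodup : d.keys.Nodup := by
    rw [hd]; exact pvDictKeysNodup versions PySem.Dict.empty (by simp)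
  have hmemd : ∀ k, k ∈ d.keys ↔ k ∈ versions.map pvVersionKey := by
    intro k; rw [hd, pvDictKeysMem]; simp
  have hkpw : ((pvDkeep [] L).map pvVersionKey).Pairwise (fun a b => b < a) :=
    pvDkeep_keys_pairwise L hLpw []
  have hknodup : ((pvDkeep [] L).map pvVersionKey).Nodup :=
    List.Pairwise.imp (fun h => ne_of_gt h) hkpw
  have hmemL : ∀ (k : List Int), k ∈ L.map pvVersionKey ↔ k ∈ versions.map pvVersionKey := by
    intro k
    have hp : L.Perm versions := PySem.List.sorted_perm versions pvVersionKey true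
    exact (hp.map pvVersionKey).mem_iff
  have hmemk : ∀ k, k ∈ (pvDkeep [] L).map pvVersionKey ↔ k ∈ d.keys := by
    intro k
    rw [hmemd, ← hmemL]
    constructor
    · intro h
      rcases List.mem_map.mp h with ⟨w, hw, rfl⟩
      exact List.mem_map_of_mem (pvDkeep_spec L [] w hw).1
    · intro h
      exact pvDkeep_mem_keys L [] k h (by simp)
  have hperm : ((pvDkeep [] L).map pvVersionKey).Perm d.keys :=
    (List.perm_ext_iff_of_nodup hknodup hnodup).mpr hmemk
  have hsortK : PySem.List.sorted d.keys (fun k => k) true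
      = (pvDkeep [] L).map pvVersionKey := by
    rw [pvSortedEqK]
    exact PySem.List.sorted_rev_eq_of_perm_of_pairwise_gt d.keys _ (fun k => k) hperm hkpw
  have hlook : ∀ v ∈ pvDkeep [] L, (d.get? (pvVersionKey v)).getD "" = v := by
    intro v hv
    obtain ⟨-, -, hhead⟩ := pvDkeep_spec L [] v hv
    rw [hL, pvSortedFilter] at hhead
    rw [hd, pvDictGet versions PySem.Dict.empty (pvVersionKey v)]
    simp [hhead]
  have hB1 : (PySem.List.sorted d.keys (fun k => k) true).map (fun k => (d.get? k).getD "")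
      = pvDkeep [] L := by
    rw [hsortK, List.map_map]
    calc (pvDkeep [] L).map ((fun k => (d.get? k).getD "") ∘ pvVersionKey)
        = (pvDkeep [] L).map id := List.map_congr_left (fun v hv => hlook v hv)
      _ = pvDkeep [] L := List.map_id _
  refine Prod.ext ?_ (Prod.ext ?_ ?_)
  · show (List.foldl pvStepA ([], PySem.Set.empty, [], []) L).1
      = (PySem.List.sorted d.keys (fun k => k) true).map (fun k => (d.get? k).getD "")
    rw [hA1, hB1, hempty, List.nil_append]
  · show (List.foldl pvStepA ([], PySem.Set.empty, [], []) L).2.2.1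
      = ((PySem.List.sorted d.keys (fun k => k) true).map
          (fun k => (d.get? k).getD "")).map (fun v => pvMainPart v)
    rw [hA2, hB1, hempty, List.nil_append]
  · show PySem.List.sorted (List.foldl pvStepA ([], PySem.Set.empty, [], []) L).2.2.2
        pvVersionKey true = L
    rw [hA4, List.nil_append, hL, pvSortedEq versions, pvSortedEq]
    exact PySem.List.sorted_rev_sorted_rev versions pvVersionKey
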